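-- pv_equiv track=rewrite | github.com/rlaplaza-lab/simple_cluster_go | scgo/initialization/templates.py | _create_balanced_base_composition
-- ===== SOURCE A (Python) =====
-- def _create_balanced_base_composition(
--     composition: list[str], base_n_atoms: int
-- ) -> list[str]:
--     """Create a balanced base composition by cycling through elements.
--
--     For multi-element compositions, this ensures the base template has
--     a balanced distribution of elements, making it easier to adjust to
--     the target composition by adding, removing, or switching labels.
--
--     Args:
--         composition: Target composition list
--         base_n_atoms: Number of atoms in the base template
--
--     Returns:
--         List of element symbols with balanced distribution
--
--     Raises:
--         ValueError: If composition is empty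
--     """
--     if not composition:
--         raise ValueError(
--             f"Cannot create balanced base composition from empty composition "
--             f"for {base_n_atoms} atoms"
--         )
--
--     if len(composition) == 1:
--         return composition * base_n_atoms
--
--     return [composition[i % len(composition)] for i in range(base_n_atoms)]
-- ===== SOURCE B (Python) =====
-- def _create_balanced_base_composition(composition, base_n_atoms):
--     if not composition:
--         raise ValueError(
--             f"Cannot create balanced base composition from empty composition "
--             f"for {base_n_atoms} atoms"
--         )
--     return (composition * (base_n_atoms // len(composition) + 1))[:base_n_atoms]
-- ===== Notes on version B (the rewrite author's own statement) =====
-- stated objective: simpler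
-- what changed: Replaces the per-index modulo comprehension and the separate single-element branch with one expression: repeat the list base_n_atoms // len + 1 times and slice to [:base_n_atoms].
import Mathlib
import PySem

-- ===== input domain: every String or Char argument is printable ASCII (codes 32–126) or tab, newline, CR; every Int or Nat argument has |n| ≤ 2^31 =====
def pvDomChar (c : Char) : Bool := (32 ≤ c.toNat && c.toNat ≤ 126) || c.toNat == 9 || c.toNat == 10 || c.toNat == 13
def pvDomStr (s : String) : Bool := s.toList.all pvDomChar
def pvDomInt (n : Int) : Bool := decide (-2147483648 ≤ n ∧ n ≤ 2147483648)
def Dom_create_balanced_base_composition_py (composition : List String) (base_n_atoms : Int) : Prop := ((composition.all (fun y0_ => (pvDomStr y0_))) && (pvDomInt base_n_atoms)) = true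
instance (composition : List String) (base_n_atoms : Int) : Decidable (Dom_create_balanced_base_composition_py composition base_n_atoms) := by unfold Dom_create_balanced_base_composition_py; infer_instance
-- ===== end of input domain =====

-- B replaces the per-index modulo comprehension (and the separate single-element branch)
-- with one expression: repeat the list n//len+1 times and slice to [:n]  (objective: simpler).

-- Python 'xs * n' (list repetition; n ≤ 0 gives []) — exact hand port
def pyListMul {α : Type} (xs : List α) (n : Int) : List α :=
  (List.replicate n.toNat xs).flatten

-- ===== PORT A =====
def create_balanced_base_composition_py (composition : List String) (base_n_atoms : Int) : List String :=
  if composition = [] then []  -- Python raises ValueError here; excluded by Pre_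
  else if PySem.List.len composition = 1 then
    pyListMul composition base_n_atoms
  else
    (PySem.List.pyRange 0 base_n_atoms 1).map
      (fun i => PySem.List.pyGetD composition (PySem.Int.mod i (PySem.List.len composition)) "")

-- ===== PORT B =====
def create_balanced_base_composition_py_alt (composition : List String) (base_n_atoms : Int) : List String :=
  if composition = [] then []  -- Python raises ValueError here; excluded by Pre_
  else
    PySem.List.slice
      (pyListMul composition (PySem.Int.floordiv base_n_atoms (PySem.List.len composition) + 1))
      none (some base_n_atoms)

-- ===== PRECONDITION & SPEC =====
-- Pre_ excludes exactly the empty composition, on which Python A (and B) raise ValueError.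
def Pre_create_balanced_base_composition_py (composition : List String) (base_n_atoms : Int) : Prop :=
  composition ≠ []
instance (composition : List String) (base_n_atoms : Int) : Decidable (Pre_create_balanced_base_composition_py composition base_n_atoms) := by unfold Pre_create_balanced_base_composition_py; infer_instance

def pvWitness_create_balanced_base_composition_py : List String × Int := (["Cu", "Zn"], 5)

def Spec_create_balanced_base_composition_py (composition : List String) (base_n_atoms : Int) (out : List String) : Prop := out = create_balanced_base_composition_py_alt composition base_n_atoms
instance (composition : List String) (base_n_atoms : Int) (out : List String) : Decidable (Spec_create_balanced_base_composition_py composition base_n_atoms out) := by unfold Spec_create_balanced_base_composition_py; infer_instance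

-- ===== CLAIM (what is proved, stated in full; the proofs are below) =====
def Claim_equal_create_balanced_base_composition_py : Prop := ∀ (composition : List String) (base_n_atoms : Int), Dom_create_balanced_base_composition_py composition base_n_atoms → Pre_create_balanced_base_composition_py composition base_n_atoms → Spec_create_balanced_base_composition_py composition base_n_atoms (create_balanced_base_composition_py composition base_n_atoms)

-- ===== LEMMAS AND PROOFS =====

-- indexing into a repeated list is cyclic indexing
lemma getElem?_flatten_replicate {α : Type} (xs : List α) (m i : Nat) (hi : i < m * xs.length) :
    ((List.replicate m xs).flatten)[i]? = xs[i % xs.length]? := by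
  induction m generalizing i with
  | zero => omega
  | succ m ih =>
    have hpos : 0 < xs.length := by
      rcases Nat.eq_zero_or_pos xs.length with h0 | h0
      · rw [h0] at hi; simp at hi
      · exact h0
    have hrepl : (List.replicate (m+1) xs).flatten = xs ++ (List.replicate m xs).flatten := by
      simp [List.replicate_succ]
    rw [hrepl]
    rcases Nat.lt_or_ge i xs.length with h | h
    · rw [List.getElem?_append_left h, Nat.mod_eq_of_lt h]
    · rw [List.getElem?_append_right h, ih (i - xs.length) (by rw [Nat.succ_mul] at hi; omega)]
      congr 1
      conv_rhs => rw [show i = (i - xs.length) + xs.length by omega]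
      rw [Nat.add_mod_right]

-- the first t elements of a sufficiently repeated list, as a range-map over cyclic indices
lemma take_flatten_replicate {α : Type} (xs : List α) (d : α) (m t : Nat)
    (ht : t ≤ m * xs.length) :
    ((List.replicate m xs).flatten).take t
      = (List.range t).map (fun i => xs.getD (i % xs.length) d) := by
  apply List.ext_getElem?
  intro i
  rw [List.getElem?_take, List.getElem?_map]
  by_cases h : i < t
  · have hpos : 0 < xs.length := by
      rcases Nat.eq_zero_or_pos xs.length with h0 | h0
      · rw [h0] at ht; omega
      · exact h0
    rw [if_pos h, getElem?_flatten_replicate xs m i (by omega), List.getElem?_range h]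
    simp [List.getD_eq_getElem?_getD, List.getElem?_eq_getElem (Nat.mod_lt _ hpos)]
  · rw [if_neg h]
    have : (List.range t)[i]? = none := by
      rw [List.getElem?_eq_none]; simpa using Nat.le_of_not_lt h
    rw [this]
    rfl

-- ===== VERDICT (by name: the statement is the Claim_ definition above) =====
theorem create_balanced_base_composition_py_spec : Claim_equal_create_balanced_base_composition_py := by
  intro c n _ hpre
  unfold Spec_create_balanced_base_composition_py
  unfold create_balanced_base_composition_py create_balanced_base_composition_py_alt
  have hc : c ≠ [] := hpre
  have hpos : 0 < c.length := List.length_pos_iff.mpr hc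
  simp only [if_neg hc]
  have hlen : PySem.List.len c = (c.length : Int) := PySem.List.len_eq c
  have hposI : (0:Int) < (c.length : Int) := by exact_mod_cast hpos
  by_cases hn : 0 ≤ n
  · -- n ≥ 0 : multiplier q+1 ≥ 1 and (q+1)*len > n; slice[:n] = take n
    set q : Int := PySem.Int.floordiv n (c.length : Int) with hq
    have hqspec : q * c.length + PySem.Int.mod n (c.length : Int) = n := by
      rw [hq]; exact PySem.Int.floordiv_mul_add_mod n (c.length : Int)
    have hmod0 : 0 ≤ PySem.Int.mod n (c.length : Int) := PySem.Int.mod_nonneg n hposI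
    have hmodlt : PySem.Int.mod n (c.length : Int) < (c.length : Int) := PySem.Int.mod_lt n hposI
    have hq0 : 0 ≤ q := by nlinarith
    have hbound : n < (q + 1) * (c.length : Int) := by nlinarith
    rw [hlen, PySem.List.slice_to _ hn]
    unfold pyListMul
    have hmt : n.toNat ≤ (q + 1).toNat * c.length := by
      have : (n.toNat : Int) ≤ ((q+1).toNat : Int) * (c.length : Int) := by
        rw [Int.toNat_of_nonneg hn, Int.toNat_of_nonneg (by omega)]
        omega
      exact_mod_cast this
    rw [take_flatten_replicate c "" ((q+1).toNat) n.toNat hmt]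
    by_cases h1 : (c.length : Int) = 1
    · -- single-element branch of A: c * n already has exactly n elements
      rw [if_pos h1]
      have hlen1 : c.length = 1 := by exact_mod_cast h1
      show (List.replicate n.toNat c).flatten = _
      have hL : (List.replicate n.toNat c).flatten.length = n.toNat := by simp [hlen1]
      calc (List.replicate n.toNat c).flatten
          = (List.replicate n.toNat c).flatten.take n.toNat := (List.take_of_length_le (by omega)).symm
        _ = (List.range n.toNat).map (fun i => c.getD (i % c.length) "") :=
            take_flatten_replicate c "" n.toNat n.toNat (by simp [hlen1])
    · -- modulo-comprehension branch of A
      rw [if_neg h1]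
      rw [PySem.List.pyRange_one]
      rw [List.map_map]
      simp only [Int.sub_zero]
      apply List.map_congr_left
      intro i _
      simp only [Function.comp_apply, Int.zero_add]
      rw [PySem.Int.mod_natCast i c.length, PySem.List.pyGetD_natCast]
  · -- n < 0 : A's range is empty; B's multiplier is ≤ 0 so the repeated list and its slice are []
    have hqneg : PySem.Int.floordiv n (c.length : Int) + 1 ≤ 0 := by
      have h1 : PySem.Int.floordiv n (c.length : Int) * c.length + PySem.Int.mod n (c.length : Int) = n :=
        PySem.Int.floordiv_mul_add_mod n (c.length : Int)
      have h2 : 0 ≤ PySem.Int.mod n (c.length : Int) := PySem.Int.mod_nonneg n hposI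
      nlinarith [PySem.Int.mod_lt n hposI]
    have hB : pyListMul c (PySem.Int.floordiv n (PySem.List.len c) + 1) = ([] : List String) := by
      unfold pyListMul
      rw [hlen]
      have h0 : (PySem.Int.floordiv n (c.length : Int) + 1).toNat = 0 := by omega
      simp [h0]
    rw [hB]
    rw [PySem.List.pyRange_one_eq_nil (by omega)]
    by_cases h1 : PySem.List.len c = 1
    · rw [if_pos h1]
      unfold pyListMul
      have h0 : n.toNat = 0 := by omega
      simp [h0, PySem.List.slice]
    · rw [if_neg h1]
      simp [PySem.List.slice]
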